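-- pv_equiv track=rewrite | github.com/hsolis11/python_notes | elevator_maintenance/elevator_maintenance.py | solution
-- ===== SOURCE A (Python) =====
-- def compare(a, b):
--     a = a.split(".")
--     b = b.split(".")
--
--     decision = False
--     swap = False
--
--     counter = 0
--     while not(decision):
--
--         try:
--             if int(a[counter]) > int(b[counter]):
--                 decision = True
--                 swap = True
--             elif int(a[counter]) == int(b[counter]):
--                 counter += 1
--             else:
--                 decision = True
--         except:
--             if len(a) > len(b):
--                 decision = True
--                 swap = True
--             decision = True
--
--     return swap
--
-- def solution(s):
--     sorted = False
--
--     if not(sorted):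
--         swapped = True
--         maxElement = len(s)-1
--
--         for i in range(maxElement):
--             if swapped:
--                 swapped = False
--                 for j in range(maxElement):
--                     if compare(s[j], s[j+1]):
--                         s[j], s[j+1] = s[j+1], s[j]
--                         swapped = True
--
--         sorted = True
--
--     return s
-- ===== SOURCE B (Python) =====
-- # Same in-place bubble passes as A, but each version string is parsed ONCE into a
-- # key (int components up to the first non-int, plus component count); the passes
-- # are carried-element sweeps comparing keys, with no per-comparison
-- # split/int()/try-except and no index arithmetic.
--
-- def _key(v):
--     parts = v.split(".")
--     ints = []
--     for c in parts:
--         try: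
--             ints.append(int(c))
--         except Exception:
--             break
--     return (ints, len(parts))
--
-- def _gt(ka, kb):
--     pa, la = ka
--     pb, lb = kb
--     for x, y in zip(pa, pb):
--         if x != y:
--             return x > y
--     return la > lb
--
-- def _sweep(d):
--     cur = d[0]
--     out = []
--     swapped = False
--     for x in d[1:]:
--         if _gt(cur[0], x[0]):
--             out.append(x)
--             swapped = True
--         else:
--             out.append(cur)
--             cur = x
--     out.append(cur)
--     return out, swapped
--
-- def solution(s):
--     d = [(_key(v), v) for v in s]
--     for _ in range(len(s) - 1):
--         d, swapped = _sweep(d)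
--         if not swapped:
--             break
--     s[:] = [v for _, v in d]
--     return s
-- ===== Notes on version B (the rewrite author's own statement) =====
-- stated objective: alternative
-- what changed: B parses each version string once into a key (list of leading int components plus component count) and runs the bubble passes as carried-element sweeps over keyed pairs, replacing the per-comparison split/int/try-except and the index-swap inner loop.
import Mathlib
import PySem

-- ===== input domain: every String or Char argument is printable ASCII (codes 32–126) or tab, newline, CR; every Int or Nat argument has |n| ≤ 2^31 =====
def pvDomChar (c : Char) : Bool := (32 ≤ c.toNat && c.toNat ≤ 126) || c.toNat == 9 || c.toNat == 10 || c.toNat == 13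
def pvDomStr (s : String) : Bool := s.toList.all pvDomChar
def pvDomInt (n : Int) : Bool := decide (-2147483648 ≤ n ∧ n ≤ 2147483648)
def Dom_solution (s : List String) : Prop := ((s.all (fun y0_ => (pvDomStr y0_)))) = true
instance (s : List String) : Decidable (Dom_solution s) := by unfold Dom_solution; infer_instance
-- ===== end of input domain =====

-- B parses each string once into a key and runs the same bubble passes as a
-- carried-element sweep over the keyed pairs instead of index swaps, removing
-- the per-comparison split/int()/except work (an alternative decomposition).
-- Both A and B sort the caller's list in place and return it; the equivalence
-- proved here is about the returned value.

-- ===== PORT A =====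
-- compare's while loop: counter walks both split lists; any failure (bad int or
-- index out of range) takes the except branch deciding by list lengths.
def compareGo (xs ys : List String) (la lb : Nat) : Bool :=
  match xs, ys with
  | x :: xs', y :: ys' =>
    match PySem.Int.ofStr? x, PySem.Int.ofStr? y with
    | some i, some j =>
      if i > j then true
      else if i = j then compareGo xs' ys' la lb
      else false
    | _, _ => decide (la > lb)
  | _, _ => decide (la > lb)

-- a.split(".") with sep "." ≠ "": split? always returns some; exact
def pySplitDot (v : String) : List String := (PySem.Str.split? v ".").getD []

def pycompare (a b : String) : Bool :=
  let a' := pySplitDot a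
  let b' := pySplitDot b
  compareGo a' b' a'.length b'.length

-- inner 'for j in range(maxElement)' loop; indices j, j+1 are always in range
-- when A runs it, the fallback branch keeps the port total.
def innerA (maxE : Nat) (j : Nat) (st : List String × Bool) : List String × Bool :=
  if _h : j < maxE then
    let s := st.1
    match PySem.List.pyGet? s (j : Int), PySem.List.pyGet? s ((j : Int) + 1) with
    | some a, some b =>
      if pycompare a b then
        innerA maxE (j + 1)
          (PySem.List.pySetD (PySem.List.pySetD s (j : Int) b) ((j : Int) + 1) a, true)
      else innerA maxE (j + 1) st
    | _, _ => st
  else st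
termination_by maxE - j

def solution (s : List String) : List String :=
  let maxElement : Int := (s.length : Int) - 1
  let st := (PySem.List.pyRange 0 maxElement 1).foldl
    (fun st _i => if st.2 then innerA maxElement.toNat 0 (st.1, false) else st)
    (s, true)
  st.1

-- ===== PORT B =====
-- _key: int components up to the first non-int, plus component count
def keyParse (parts : List String) : List Int :=
  match parts with
  | [] => []
  | c :: rest =>
    match PySem.Int.ofStr? c with
    | some i => i :: keyParse rest
    | none => []

def bkey (v : String) : List Int × Nat :=
  let parts := pySplitDot v
  (keyParse parts, parts.length)

-- _gt
def keyGTGo (pa pb : List Int) (la lb : Nat) : Bool :=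
  match pa, pb with
  | x :: xs, y :: ys => if x ≠ y then decide (x > y) else keyGTGo xs ys la lb
  | _, _ => decide (la > lb)

def keyGT (ka kb : List Int × Nat) : Bool := keyGTGo ka.1 kb.1 ka.2 kb.2

-- _sweep: one carried-element pass (out built front-to-back as a reversed
-- accumulator, as the Python appends); never called on [] by solution_alt's
-- loop, the [] branch keeps it total.
def bsweep (d : List ((List Int × Nat) × String)) :
    List ((List Int × Nat) × String) × Bool :=
  match d with
  | [] => ([], false)
  | cur0 :: rest =>
    let st := rest.foldl
      (fun (st : List ((List Int × Nat) × String) × ((List Int × Nat) × String) × Bool) x =>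
        if keyGT st.2.1.1 x.1 then (x :: st.1, st.2.1, true)
        else (st.2.1 :: st.1, x, st.2.2))
      ([], cur0, false)
    ((st.2.1 :: st.1).reverse, st.2.2)

-- the 'for _ in range(len(s)-1): … if not swapped: break' loop
def bloop (d : List ((List Int × Nat) × String)) (budget : Nat) :
    List ((List Int × Nat) × String) :=
  match budget with
  | 0 => d
  | b + 1 =>
    let r := bsweep d
    if r.2 then bloop r.1 b else r.1

def solution_alt (s : List String) : List String :=
  let d := s.map (fun v => (bkey v, v))
  (bloop d (s.length - 1)).map Prod.snd

-- ===== PRECONDITION & SPEC =====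
def Spec_solution (s : List String) (out : List String) : Prop := out = solution_alt s
instance (s : List String) (out : List String) : Decidable (Spec_solution s out) := by unfold Spec_solution; infer_instance

-- ===== CLAIM (what is proved, stated in full; the proofs are below) =====
def Claim_equal_solution : Prop := ∀ (s : List String), Dom_solution s → Spec_solution s (solution s)

-- ===== LEMMAS AND PROOFS =====

-- reference single pass: (emitted prefix, final carried element, swapped flag)
def sweep2 (cur : String) (xs : List String) : List String × String × Bool :=
  match xs with
  | [] => ([], cur, false)
  | x :: xs' =>
    if pycompare cur x then
      let r := sweep2 cur xs'
      (x :: r.1, r.2.1, true)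
    else
      let r := sweep2 x xs'
      (cur :: r.1, r.2.1, r.2.2)

-- reference pass on plain strings
def passS (l : List String) : List String × Bool :=
  match l with
  | [] => ([], false)
  | cur :: rest =>
    ((sweep2 cur rest).1 ++ [(sweep2 cur rest).2.1], (sweep2 cur rest).2.2)

-- reference outer loop
def loopRef (l : List String) (b : Nat) : List String :=
  match b with
  | 0 => l
  | b + 1 => if (passS l).2 then loopRef (passS l).1 b else (passS l).1

theorem compareGo_eq_keyGTGo (xs ys : List String) (la lb : Nat) :
    compareGo xs ys la lb = keyGTGo (keyParse xs) (keyParse ys) la lb := by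
  induction xs generalizing ys with
  | nil => cases ys <;> simp [compareGo, keyParse, keyGTGo]
  | cons x xs' ih =>
    cases ys with
    | nil =>
      cases hx : PySem.Int.ofStr? x <;>
        simp [compareGo, keyParse, keyGTGo, hx]
    | cons y ys' =>
      cases hx : PySem.Int.ofStr? x <;> cases hy : PySem.Int.ofStr? y <;>
        simp [compareGo, keyParse, keyGTGo, hx, hy]
      rename_i i j
      by_cases hij : i = j
      · subst hij; simp [ih ys']
      · rcases lt_or_gt_of_ne hij with h | h
        · simp [hij, not_lt.mpr (le_of_lt h)]
        · simp [hij, h]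

theorem pycompare_eq_keyGT (a b : String) :
    pycompare a b = keyGT (bkey a) (bkey b) := by
  simp [pycompare, keyGT, bkey, compareGo_eq_keyGTGo]

def pvDec (v : String) : (List Int × Nat) × String := (bkey v, v)

theorem length_sweep2 (cur : String) (xs : List String) :
    (sweep2 cur xs).1.length = xs.length := by
  induction xs generalizing cur with
  | nil => simp [sweep2]
  | cons x xs' ih =>
    by_cases h : pycompare cur x = true <;> simp [sweep2, h, ih]

theorem length_passS (l : List String) : (passS l).1.length = l.length := by
  cases l with
  | nil => simp [passS]
  | cons cur rest => simp [passS, length_sweep2]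

-- B's fold realises sweep2 on the decorated list
theorem bsweep_fold (xs : List String) (outRev : List ((List Int × Nat) × String))
    (cur : String) (sw : Bool) :
    (xs.map pvDec).foldl
      (fun (st : List ((List Int × Nat) × String) × ((List Int × Nat) × String) × Bool) x =>
        if keyGT st.2.1.1 x.1 then (x :: st.1, st.2.1, true)
        else (st.2.1 :: st.1, x, st.2.2))
      (outRev, pvDec cur, sw)
    = (((sweep2 cur xs).1.map pvDec).reverse ++ outRev,
        pvDec (sweep2 cur xs).2.1, sw || (sweep2 cur xs).2.2) := by
  induction xs generalizing outRev cur sw with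
  | nil => simp [sweep2]
  | cons x xs' ih =>
    have hk : keyGT (pvDec cur).1 (pvDec x).1 = pycompare cur x := by
      simp [pvDec, pycompare_eq_keyGT]
    by_cases h : pycompare cur x = true
    · simp only [List.map_cons, List.foldl_cons, hk, h, if_true]
      rw [ih]
      simp [sweep2, h]
    · simp only [List.map_cons, List.foldl_cons, hk, h]
      rw [if_neg (by decide)]
      rw [ih]
      simp [sweep2, h]

theorem bsweep_map (l : List String) :
    bsweep (l.map pvDec) = ((passS l).1.map pvDec, (passS l).2) := by
  cases l with
  | nil => simp [bsweep, passS]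
  | cons cur rest =>
    simp only [List.map_cons, bsweep, bsweep_fold rest [] cur false, passS]
    simp

theorem bloop_map (b : Nat) (l : List String) :
    bloop (l.map pvDec) b = (loopRef l b).map pvDec := by
  induction b generalizing l with
  | zero => simp [bloop, loopRef]
  | succ b ih =>
    simp only [bloop, bsweep_map, loopRef]
    by_cases h : (passS l).2 = true <;> simp [h, ih]

-- A's indexed inner loop realises sweep2 with the processed prefix untouched
theorem innerA_go (rest pre : List String) (cur : String) (sw : Bool) :
    innerA (pre.length + rest.length) pre.length (pre ++ cur :: rest, sw)
      = (pre ++ (sweep2 cur rest).1 ++ [(sweep2 cur rest).2.1],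
         sw || (sweep2 cur rest).2.2) := by
  induction rest generalizing pre cur sw with
  | nil =>
    rw [innerA]
    simp [sweep2]
  | cons x rest' ih =>
    have hlt : pre.length < pre.length + (x :: rest').length := by simp
    have hget1 : PySem.List.pyGet? (pre ++ cur :: x :: rest') (pre.length : Int)
        = some cur := PySem.List.pyGet?_append_length pre (x :: rest') cur
    have hre : pre ++ cur :: x :: rest' = (pre ++ [cur]) ++ x :: rest' := by simp
    have hlen1 : (((pre ++ [cur]).length : Nat) : Int) = (pre.length : Int) + 1 := by
      simp
    have hget2 : PySem.List.pyGet? (pre ++ cur :: x :: rest') ((pre.length : Int) + 1)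
        = some x := by
      rw [hre, ← hlen1]
      exact PySem.List.pyGet?_append_length (pre ++ [cur]) rest' x
    rw [innerA, dif_pos hlt]
    simp only [hget1, hget2]
    by_cases h : pycompare cur x = true
    · -- swap branch: list becomes pre ++ x :: cur :: rest'
      have hset : PySem.List.pySetD
            (PySem.List.pySetD (pre ++ cur :: x :: rest') (pre.length : Int) x)
            ((pre.length : Int) + 1) cur
          = pre ++ x :: cur :: rest' := by
        rw [PySem.List.pySetD_natCast]
        have h1 : (pre ++ cur :: x :: rest').set pre.length x
            = pre ++ x :: x :: rest' := by
          rw [List.set_append_right _ _ (le_refl _)]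
          simp
        rw [h1]
        have h2 : ((pre.length : Int) + 1) = (((pre ++ [x]).length : Nat) : Int) := by
          simp
        rw [h2, PySem.List.pySetD_natCast]
        rw [show pre ++ x :: x :: rest' = (pre ++ [x]) ++ x :: rest' by simp]
        rw [List.set_append_right _ _ (le_refl _)]
        simp
      have hlen2 : pre.length + (x :: rest').length
          = (pre ++ [x]).length + rest'.length := by simp; omega
      have hj : pre.length + 1 = (pre ++ [x]).length := by simp
      rw [h, if_pos rfl, hset, hlen2, hj]
      rw [show pre ++ x :: cur :: rest' = (pre ++ [x]) ++ cur :: rest' by simp]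
      rw [ih (pre ++ [x]) cur true]
      simp [sweep2, h]
    · have hlen2 : pre.length + (x :: rest').length
          = (pre ++ [cur]).length + rest'.length := by simp; omega
      have hj : pre.length + 1 = (pre ++ [cur]).length := by simp
      rw [if_neg h, hlen2, hj, hre]
      rw [ih (pre ++ [cur]) x sw]
      simp [sweep2, h]

theorem innerA_pass (l : List String) (hl : l ≠ []) (sw : Bool) :
    innerA (l.length - 1) 0 (l, sw) = ((passS l).1, sw || (passS l).2) := by
  cases l with
  | nil => exact absurd rfl hl
  | cons cur rest =>
    have h := innerA_go rest [] cur sw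
    simpa [passS] using h

-- flag false: the outer fold is inert
theorem foldA_false (idxs : List Int) (n : Nat) (l : List String) :
    idxs.foldl
      (fun (st : List String × Bool) _i =>
        if st.2 then innerA n 0 (st.1, false) else st)
      (l, false) = (l, false) := by
  induction idxs with
  | nil => rfl
  | cons i idxs' ih => simpa using ih

theorem foldA (idxs : List Int) (n : Nat) (l : List String) (hn : l.length = n)
    (h1 : 1 ≤ n) :
    (idxs.foldl
      (fun (st : List String × Bool) _i =>
        if st.2 then innerA (n - 1) 0 (st.1, false) else st)
      (l, true)).1 = loopRef l idxs.length := by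
  induction idxs generalizing l with
  | nil => simp [loopRef]
  | cons i idxs' ih =>
    have hl : l ≠ [] := by
      intro h; rw [h] at hn; simp at hn; omega
    have hp : innerA (n - 1) 0 (l, false) = ((passS l).1, (passS l).2) := by
      have h := innerA_pass l hl false
      rw [hn] at h; simpa using h
    simp only [List.foldl_cons]
    rw [if_pos trivial, hp]
    by_cases hf : (passS l).2 = true
    · rw [hf]
      have hlen : (passS l).1.length = n := by rw [length_passS, hn]
      rw [ih (passS l).1 hlen]
      simp [loopRef, hf]
    · simp only [Bool.not_eq_true] at hf
      rw [hf, foldA_false]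
      simp [loopRef, hf]

-- ===== VERDICT (by name: the statement is the Claim_ definition above) =====
theorem solution_spec : Claim_equal_solution := by
  intro s _hdom
  simp only [Spec_solution, solution, solution_alt]
  cases s with
  | nil => rfl
  | cons a s' =>
    have hnat : (((a :: s').length : Int) - 1).toNat = (a :: s').length - 1 := by simp
    simp only [hnat]
    rw [foldA _ ((a :: s').length) (a :: s') rfl (by simp)]
    rw [show (PySem.List.pyRange 0 (((a :: s').length : Int) - 1) 1).length
        = (a :: s').length - 1 from by rw [PySem.List.length_pyRange_one]; simp]
    rw [show (a :: s').map (fun v => (bkey v, v)) = (a :: s').map pvDec from by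
      simp [pvDec]]
    rw [bloop_map]
    simp [Function.comp_def, pvDec]
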